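-- pv_equiv track=rewrite | github.com/Tina-ZJ/all_myjd_project | segment/BiGRU+CRF/ParseUtil.py | parseTag
-- ===== SOURCE A (Python) =====
-- def parseTag(tags, line, id2label):
--     res = []
--     tmp = []
--     for i in range(len(tags)):
--         tag = id2label[tags[i]]
--         bies = tag[0]
--         t = tag[2:]
--         tmp.append(line[i])
--         if bies == "S" or bies == "E":
--             res.append("".join(tmp) if len(t) == 0 else "".join(tmp) + "/" + t)
--             tmp = []
--
--     if len(tmp) > 0:
--         res.append("".join(tmp) if len(t) == 0 else "".join(tmp) + "/" + t)
--     return " ".join(res)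
-- ===== SOURCE B (Python) =====
-- def parseTag(tags, line, id2label):
--     # Phase 0: resolve every tag id to its label once.
--     labels = [id2label[t] for t in tags]
--     pairs = list(zip(labels, line))
--
--     # Phase 1: cut the token stream into segments at 'S'/'E' labels,
--     # recursing on the remainder after each cut; a trailing unterminated
--     # run forms one segment typed by its last label.
--     def segments(ps):
--         for j, (lab, _) in enumerate(ps):
--             if lab[0] in ("S", "E"):
--                 head = ([tok for _, tok in ps[:j + 1]], lab[2:])
--                 return [head] + segments(ps[j + 1:])
--         if ps:
--             return [([tok for _, tok in ps], ps[-1][0][2:])]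
--         return []
--
--     # Phase 2: format each segment and join with spaces.
--     return " ".join("".join(toks) + ("/" + t if t else "")
--                     for toks, t in segments(pairs))
-- ===== Notes on version B (the rewrite author's own statement) =====
-- stated objective: alternative
-- what changed: Replaces A's single index loop with inline flushing by three phases: resolve all labels once, recursively cut the zipped (label,token) stream at each S/E position into explicit (tokens,type) segments, then format segments and join in a separate pass.
import Mathlib
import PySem

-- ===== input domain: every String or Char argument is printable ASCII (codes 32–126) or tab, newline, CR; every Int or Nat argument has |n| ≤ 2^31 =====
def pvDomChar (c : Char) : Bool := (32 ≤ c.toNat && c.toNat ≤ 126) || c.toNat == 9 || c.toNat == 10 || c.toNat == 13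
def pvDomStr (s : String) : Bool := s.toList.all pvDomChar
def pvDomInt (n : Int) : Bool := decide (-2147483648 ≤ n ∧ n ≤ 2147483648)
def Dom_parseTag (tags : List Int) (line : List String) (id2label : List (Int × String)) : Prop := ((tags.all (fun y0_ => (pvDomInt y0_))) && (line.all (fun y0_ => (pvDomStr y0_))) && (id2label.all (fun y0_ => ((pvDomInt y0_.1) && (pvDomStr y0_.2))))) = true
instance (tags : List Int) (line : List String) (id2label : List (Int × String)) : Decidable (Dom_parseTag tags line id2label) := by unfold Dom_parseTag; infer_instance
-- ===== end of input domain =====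

-- B re-implements A's single flushing loop as three phases (resolve labels, recursively cut
-- the (label,token) stream into segments at S/E labels, then format); equal output on Pre_.


-- shared primitive helpers (one Python expression each, used by both ports)
-- id2label[k]  (Pre_ guarantees the key is present and the label non-empty)
def pvLook (d : List (Int × String)) (k : Int) : String :=
  (PySem.Dict.get? (PySem.Dict.mk d) k).getD ""
-- tag[0]  (Pre_ guarantees the label is non-empty, so the default is never used)
def pvBies (tag : String) : Char := (PySem.Str.pyGet? tag 0).getD ' '
-- bies == "S" or bies == "E"
def pvCut (tag : String) : Bool := pvBies tag == 'S' || pvBies tag == 'E'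
-- tag[2:]
def pvTyp (tag : String) : String := PySem.Str.slice tag (some 2) none

-- ===== PORT A =====
-- the body of A's for-loop (state = (res, tmp, t); p = (tags[i], line[i]))
def pvStepA (d : List (Int × String)) (st : List String × List String × String)
    (p : Int × String) : List String × List String × String :=
  let tag := pvLook d p.1
  let t := pvTyp tag
  let tmp := st.2.1 ++ [p.2]
  if pvCut tag then
    (st.1 ++ [if PySem.Str.len t == 0 then PySem.Str.join "" tmp
              else PySem.Str.join "" tmp ++ "/" ++ t], [], t)
  else (st.1, tmp, t)

def parseTag (tags : List Int) (line : List String) (id2label : List (Int × String)) : String :=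
  let st := (PySem.List.pyRange 0 (tags.length : Int) 1).foldl
    (fun st i => pvStepA id2label st
        (PySem.List.pyGetD tags i 0, PySem.List.pyGetD line i "")) ([], [], "")
  PySem.Str.join " "
    (if st.2.1.length > 0 then
       st.1 ++ [if PySem.Str.len st.2.2 == 0 then PySem.Str.join "" st.2.1
                else PySem.Str.join "" st.2.1 ++ "/" ++ st.2.2]
     else st.1)

-- ===== PORT B =====
-- phase 1 of Source B: recursively cut ps at the first S/E label
def pvSegs (ps : List (String × String)) : List (List String × String) :=
  match h : ps.findIdx? (fun p => pvCut p.1) with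
  | some j =>
      ((ps.take (j+1)).map Prod.snd, pvTyp (ps.getD j ("", "")).1) :: pvSegs (ps.drop (j+1))
  | none =>
      if ps.isEmpty then []
      else [(ps.map Prod.snd, pvTyp (PySem.List.pyGetD ps (-1) ("", "")).1)]
termination_by ps.length
decreasing_by
  simp only [List.length_drop]
  have hne : ps ≠ [] := by rintro rfl; simp at h
  have : 0 < ps.length := List.length_pos_iff.mpr hne
  omega

-- phase 2 of Source B: format one segment
def pvFmtB (p : List String × String) : String :=
  PySem.Str.join "" p.1 ++ (if p.2 ≠ "" then "/" ++ p.2 else "")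

def parseTag_alt (tags : List Int) (line : List String) (id2label : List (Int × String)) : String :=
  let labels := tags.map (fun t => pvLook id2label t)
  let pairs := labels.zip line
  PySem.Str.join " " ((pvSegs pairs).map pvFmtB)

-- ===== PRECONDITION & SPEC =====
-- Pre_ excludes exactly the inputs where the Python A raises: an index i < len(tags) with
-- i ≥ len(line) (IndexError on line[i]), a tag id missing from id2label (KeyError), or an
-- empty label string (IndexError on tag[0]).
def Pre_parseTag (tags : List Int) (line : List String) (id2label : List (Int × String)) : Prop :=
  tags.length ≤ line.length ∧
    ∀ k ∈ tags, (PySem.Dict.get? (PySem.Dict.mk id2label) k).getD "" ≠ ""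
instance (tags : List Int) (line : List String) (id2label : List (Int × String)) : Decidable (Pre_parseTag tags line id2label) := by unfold Pre_parseTag; infer_instance

def pvWitness_parseTag : List Int × List String × (List (Int × String)) :=
  ([0, 1], ["ab", "c"], [(0, "B-n"), (1, "E-n")])

def Spec_parseTag (tags : List Int) (line : List String) (id2label : List (Int × String)) (out : String) : Prop := out = parseTag_alt tags line id2label
instance (tags : List Int) (line : List String) (id2label : List (Int × String)) (out : String) : Decidable (Spec_parseTag tags line id2label out) := by unfold Spec_parseTag; infer_instance

-- ===== CLAIM (what is proved, stated in full; the proofs are below) =====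
def Claim_equal_parseTag : Prop := ∀ (tags : List Int) (line : List String) (id2label : List (Int × String)), Dom_parseTag tags line id2label → Pre_parseTag tags line id2label → Spec_parseTag tags line id2label (parseTag tags line id2label)

-- ===== LEMMAS AND PROOFS =====

-- A's loop body on an already-resolved (label, token) pair
def pvStepL (st : List String × List String × String) (p : String × String) :
    List String × List String × String :=
  let t := pvTyp p.1
  let tmp := st.2.1 ++ [p.2]
  if pvCut p.1 then
    (st.1 ++ [if PySem.Str.len t == 0 then PySem.Str.join "" tmp
              else PySem.Str.join "" tmp ++ "/" ++ t], [], t)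
  else (st.1, tmp, t)

-- A's loop as a recursion carrying the open buffer (tmp, t), producing segments
def pvRun (ps : List (String × String)) (tmp : List String) (t : String) :
    List (List String × String) :=
  match ps with
  | [] => if tmp = [] then [] else [(tmp, t)]
  | p :: rest =>
      let t' := pvTyp p.1
      if pvCut p.1 then (tmp ++ [p.2], t') :: pvRun rest [] t'
      else pvRun rest (tmp ++ [p.2]) t'

-- A's final flush, as a named function of the loop state
def pvFin (st : List String × List String × String) : List String :=
  if st.2.1.length > 0 then
    st.1 ++ [if PySem.Str.len st.2.2 == 0 then PySem.Str.join "" st.2.1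
             else PySem.Str.join "" st.2.1 ++ "/" ++ st.2.2]
  else st.1

theorem pv_fmt_eq (tmp : List String) (t : String) :
    (if PySem.Str.len t == 0 then PySem.Str.join "" tmp
     else PySem.Str.join "" tmp ++ "/" ++ t) = pvFmtB (tmp, t) := by
  by_cases ht : t = "" <;>
    simp [pvFmtB, PySem.Str.len_eq, ht, String.append_empty, String.append_assoc]

theorem pv_fold_eq_zip (d : List (Int × String)) (tags : List Int) (line : List String)
    (h : tags.length ≤ line.length) (st : List String × List String × String) :
    (PySem.List.pyRange 0 (tags.length : Int) 1).foldl
      (fun st i => pvStepA d st (PySem.List.pyGetD tags i 0, PySem.List.pyGetD line i "")) st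
    = ((tags.map (fun k => pvLook d k)).zip line).foldl pvStepL st := by
  have hmap : (PySem.List.pyRange 0 (tags.length : Int) 1).map
      (fun i => (pvLook d (PySem.List.pyGetD tags i 0), PySem.List.pyGetD line i ""))
      = (tags.map (fun k => pvLook d k)).zip line := by
    apply List.ext_getElem
    · simp [PySem.List.length_pyRange_one]; omega
    · intro k h1 h2
      have hk : k < tags.length := by
        simpa [PySem.List.length_pyRange_one] using h1
      simp [PySem.List.getElem_pyRange_one, List.getElem_zip, hk,
        Nat.lt_of_lt_of_le hk h]
  rw [← hmap, List.foldl_map]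
  rfl

theorem pv_foldl_run (ps : List (String × String)) :
    ∀ (res tmp : List String) (t : String),
    pvFin (ps.foldl pvStepL (res, tmp, t)) = res ++ (pvRun ps tmp t).map pvFmtB := by
  induction ps with
  | nil =>
    intro res tmp t
    cases tmp with
    | nil => simp [pvFin, pvRun]
    | cons a l => simp [pvFin, pvRun, ← pv_fmt_eq]
  | cons p rest ih =>
    intro res tmp t
    simp only [List.foldl_cons]
    by_cases hc : pvCut p.1
    · have hstep : pvStepL (res, tmp, t) p
          = (res ++ [if PySem.Str.len (pvTyp p.1) == 0 then PySem.Str.join "" (tmp ++ [p.2])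
                     else PySem.Str.join "" (tmp ++ [p.2]) ++ "/" ++ pvTyp p.1], [], pvTyp p.1) := by
        simp [pvStepL, hc]
      rw [hstep, ih]
      simp only [pvRun]
      rw [if_pos hc, pv_fmt_eq]
      simp [List.append_assoc]
    · have hstep : pvStepL (res, tmp, t) p = (res, tmp ++ [p.2], pvTyp p.1) := by
        simp [pvStepL, hc]
      rw [hstep, ih]
      simp only [pvRun]
      rw [if_neg hc]

theorem pv_run_eq (ps : List (String × String)) :
    ∀ (tmp : List String) (t : String),
    pvRun ps tmp t =
      match ps.findIdx? (fun p => pvCut p.1) with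
      | some j => (tmp ++ (ps.take (j+1)).map Prod.snd, pvTyp (ps.getD j ("", "")).1)
                    :: pvRun (ps.drop (j+1)) [] (pvTyp (ps.getD j ("", "")).1)
      | none =>
        match ps.getLast? with
        | some q => [(tmp ++ ps.map Prod.snd, pvTyp q.1)]
        | none => if tmp = [] then [] else [(tmp, t)] := by
  induction ps with
  | nil => intro tmp t; simp [pvRun]
  | cons p rest ih =>
    intro tmp t
    by_cases hc : pvCut p.1
    · simp only [pvRun, List.findIdx?_cons, hc]
      simp
    · simp only [pvRun, List.findIdx?_cons, hc]
      rw [ih (tmp ++ [p.2]) (pvTyp p.1)]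
      cases hf : rest.findIdx? (fun p => pvCut p.1) with
      | some j =>
        simp [List.append_assoc, List.take_succ_cons, List.drop_succ_cons]
      | none =>
        cases hl : rest.getLast? with
        | some q =>
          cases rest with
          | nil => simp at hl
          | cons b l =>
            simp [List.getLast?_cons_cons, hl, List.append_assoc]
        | none =>
          have hre : rest = [] := by
            cases rest with
            | nil => rfl
            | cons a l => simp at hl
          subst hre
          simp

theorem pv_run_segs : ∀ (ps : List (String × String)) (t : String), pvRun ps [] t = pvSegs ps
  | ps, t => by
    rw [pv_run_eq, pvSegs.eq_def]
    cases hf : ps.findIdx? (fun p => pvCut p.1) with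
    | some j =>
      have hne : ps ≠ [] := by rintro rfl; simp at hf
      have hlt : ps.length - (j+1) < ps.length := by
        have : 0 < ps.length := List.length_pos_iff.mpr hne
        omega
      simp
      exact pv_run_segs (ps.drop (j+1)) _
    | none =>
      cases ps with
      | nil => simp
      | cons b l =>
        rw [PySem.List.pyGetD_neg_one (h := List.cons_ne_nil b l)]
        simp [List.getLast?_eq_some_getLast]
  termination_by ps _ => ps.length
  decreasing_by simp only [List.length_drop]; omega

-- ===== VERDICT (by name: the statement is the Claim_ definition above) =====
theorem parseTag_spec : Claim_equal_parseTag := by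
  intro tags line d _ hpre
  show parseTag tags line d = parseTag_alt tags line d
  have h1 := pv_fold_eq_zip d tags line hpre.1 ([], [], "")
  show PySem.Str.join " " (pvFin ((PySem.List.pyRange 0 (tags.length : Int) 1).foldl
      (fun st i => pvStepA d st (PySem.List.pyGetD tags i 0, PySem.List.pyGetD line i ""))
      ([], [], ""))) = parseTag_alt tags line d
  rw [h1, pv_foldl_run, pv_run_segs]
  show PySem.Str.join " "
      ([] ++ (pvSegs ((tags.map (fun k => pvLook d k)).zip line)).map pvFmtB) = _
  rw [List.nil_append]
  rfl
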